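-- pv_equiv track=rewrite | github.com/virtyaluk/leetcode | problems/1452/solution.py | peopleIndexes
-- ===== SOURCE A (Python) =====
-- from typing import List
--
-- def peopleIndexes(favoriteCompanies: List[List[str]]) -> List[int]:
--     ans = []
--
--     for i in range(len(favoriteCompanies)):
--         s1, is_sub = set(favoriteCompanies[i]), False
--
--         for j in range(len(favoriteCompanies)):
--             if i == j:
--                 continue
--
--             if s1.issubset(set(favoriteCompanies[j])):
--                 is_sub = True
--
--         if not is_sub:
--             ans.append(i)
--
--     return ans
-- ===== SOURCE B (Python) =====
-- def peopleIndexes(favoriteCompanies):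
--     # Inverted index: company -> set of person indices listing it.
--     postings = {}
--     for i, fav in enumerate(favoriteCompanies):
--         for c in fav:
--             postings.setdefault(c, set()).add(i)
--     n = len(favoriteCompanies)
--     ans = []
--     for i, fav in enumerate(favoriteCompanies):
--         if not fav:
--             # empty set is a subset of any other person's set
--             if n <= 1:
--                 ans.append(i)
--             continue
--         inter = set(postings[fav[0]])
--         for c in fav[1:]:
--             inter &= postings[c]
--         inter.discard(i)
--         if not inter:
--             ans.append(i)
--     return ans
-- ===== Notes on version B (the rewrite author's own statement) =====
-- stated objective: faster
-- what changed: Replaces A's all-pairs subset testing with an inverted index (company -> posting set of person indices): each person is decided by intersecting the posting sets of its companies instead of comparing against every other person's set.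
import Mathlib
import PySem

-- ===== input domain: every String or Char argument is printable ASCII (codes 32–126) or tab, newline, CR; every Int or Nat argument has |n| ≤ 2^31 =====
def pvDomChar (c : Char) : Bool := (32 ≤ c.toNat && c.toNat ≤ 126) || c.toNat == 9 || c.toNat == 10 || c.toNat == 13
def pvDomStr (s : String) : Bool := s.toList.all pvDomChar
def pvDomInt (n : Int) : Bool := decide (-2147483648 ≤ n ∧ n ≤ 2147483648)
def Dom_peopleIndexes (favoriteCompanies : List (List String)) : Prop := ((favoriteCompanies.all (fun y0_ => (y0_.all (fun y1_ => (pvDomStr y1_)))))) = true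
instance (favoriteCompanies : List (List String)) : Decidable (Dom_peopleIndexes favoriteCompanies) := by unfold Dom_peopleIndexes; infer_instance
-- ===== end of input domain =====

-- B replaces A's quadratic all-pairs subset test by an inverted index (company -> posting set
-- of person indices) and decides each person by intersecting the posting sets of its companies.

-- ===== PORT A =====
def peopleIndexes (favoriteCompanies : List (List String)) : List Int :=
  (PySem.List.pyRange 0 (PySem.List.len favoriteCompanies) 1).foldl (fun ans i =>
    let s1 : PySem.Set String := PySem.Set.ofList (PySem.List.pyGetD favoriteCompanies i [])
    let isSub : Bool :=
      (PySem.List.pyRange 0 (PySem.List.len favoriteCompanies) 1).foldl (fun b j =>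
        if i == j then b
        else if PySem.Set.issubset s1 (PySem.Set.ofList (PySem.List.pyGetD favoriteCompanies j [])) then true
        else b) false
    if !isSub then ans ++ [i] else ans) []

-- ===== PORT B =====
def pvPostings (favoriteCompanies : List (List String)) : PySem.Dict String (PySem.Set Int) :=
  (PySem.List.enumerate favoriteCompanies 0).foldl
    (fun d p => p.2.foldl
      (fun d c => d.modify c PySem.Set.empty (fun s => PySem.Set.add s p.1)) d)
    PySem.Dict.empty

def peopleIndexes_alt (favoriteCompanies : List (List String)) : List Int :=
  let postings := pvPostings favoriteCompanies
  let n : Int := PySem.List.len favoriteCompanies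
  (PySem.List.enumerate favoriteCompanies 0).foldl (fun ans p =>
    let keep : Bool :=
      match p.2 with
      | [] => decide (n ≤ 1)
      | c0 :: rest =>
        -- postings[fav[0]]: the key is always present (p.1 itself was posted under c0)
        let inter0 : PySem.Set Int := PySem.Set.ofList (postings.getD c0 PySem.Set.empty)
        let inter := rest.foldl
          (fun s c => PySem.Set.inter s (postings.getD c PySem.Set.empty)) inter0
        (PySem.Set.discard inter p.1).isEmpty
    if keep then ans ++ [p.1] else ans) []

-- ===== PRECONDITION & SPEC =====
def Spec_peopleIndexes (favoriteCompanies : List (List String)) (out : List Int) : Prop := out = peopleIndexes_alt favoriteCompanies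
instance (favoriteCompanies : List (List String)) (out : List Int) : Decidable (Spec_peopleIndexes favoriteCompanies out) := by unfold Spec_peopleIndexes; infer_instance

-- ===== CLAIM (what is proved, stated in full; the proofs are below) =====
def Claim_equal_peopleIndexes : Prop := ∀ (favoriteCompanies : List (List String)), Dom_peopleIndexes favoriteCompanies → Spec_peopleIndexes favoriteCompanies (peopleIndexes favoriteCompanies)

-- ===== LEMMAS AND PROOFS =====

-- A's inner flag loop is an 'any'
theorem pv_foldl_flag (e s : Int → Bool) : ∀ (l : List Int) (b : Bool),
    l.foldl (fun b j => if e j then b else if s j then true else b) b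
      = (b || l.any (fun j => !e j && s j)) := by
  intro l
  induction l with
  | nil => simp
  | cons x xs ih =>
    intro b
    simp only [List.foldl_cons, List.any_cons, ih]
    cases he : e x <;> cases hs : s x <;> simp_all

-- membership in the dict after the inner posting loop over one favourite list
theorem pv_inner_mem (i : Int) : ∀ (cs : List String) (d : PySem.Dict String (PySem.Set Int))
    (c : String) (j : Int),
    (j ∈ (cs.foldl (fun d c => d.modify c PySem.Set.empty (fun s => PySem.Set.add s i)) d).getD c PySem.Set.empty
      ↔ j ∈ d.getD c PySem.Set.empty ∨ (c ∈ cs ∧ j = i)) := by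
  intro cs
  induction cs with
  | nil => simp
  | cons c' cs ih =>
    intro d c j
    simp only [List.foldl_cons, ih]
    rw [PySem.Dict.getD_modify]
    by_cases hc : c = c'
    · subst hc
      simp [PySem.Set.mem_add]
      tauto
    · simp [hc]

theorem pv_outer_mem : ∀ (l : List (Int × List String)) (d : PySem.Dict String (PySem.Set Int))
    (c : String) (j : Int),
    (j ∈ (l.foldl (fun d p => p.2.foldl
          (fun d c => d.modify c PySem.Set.empty (fun s => PySem.Set.add s p.1)) d) d).getD c PySem.Set.empty
      ↔ j ∈ d.getD c PySem.Set.empty ∨ ∃ p ∈ l, c ∈ p.2 ∧ j = p.1) := by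
  intro l
  induction l with
  | nil => simp
  | cons p l ih =>
    intro d c j
    simp only [List.foldl_cons, ih, pv_inner_mem, List.mem_cons]
    aesop

theorem pv_postings_mem (fav : List (List String)) (c : String) (j : Int) :
    j ∈ (pvPostings fav).getD c PySem.Set.empty
      ↔ ∃ (k : Nat) (h : k < fav.length), c ∈ fav[k] ∧ j = (k : Int) := by
  unfold pvPostings
  rw [pv_outer_mem]
  simp only [PySem.Dict.getD_empty]
  constructor
  · rintro (h | ⟨p, hp, hc, hj⟩)
    · simp [PySem.Set.empty] at h
    · obtain ⟨k, hk, rfl⟩ := (PySem.List.mem_enumerate_iff _ _ _).1 hp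
      exact ⟨k, hk, by simpa using hc, by simpa using hj⟩
  · rintro ⟨k, hk, hc, rfl⟩
    exact Or.inr ⟨((k : Int), fav[k]), (PySem.List.mem_enumerate_iff _ _ _).2 ⟨k, hk, by simp⟩, hc, rfl⟩

theorem pv_interfold_mem (g : String → PySem.Set Int) : ∀ (rest : List String) (s0 : List Int) (j : Int),
    j ∈ rest.foldl (fun s c => PySem.Set.inter s (g c)) s0 ↔ j ∈ s0 ∧ ∀ c ∈ rest, j ∈ g c := by
  intro rest
  induction rest with
  | nil => simp
  | cons c rest ih =>
    intro s0 j
    simp only [List.foldl_cons, ih, PySem.Set.mem_inter, List.forall_mem_cons]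
    tauto

theorem pv_getD_nat (fav : List (List String)) (k : Nat) (hk : k < fav.length) :
    PySem.List.pyGetD fav (k : Int) ([] : List String) = fav[k] := by
  simp [PySem.List.pyGetD_natCast, List.getD_eq_getElem?_getD, List.getElem?_eq_getElem hk]

theorem pv_cast_toNat (fav : List (List String)) (x : Int) (hx0 : 0 ≤ x) :
    PySem.List.pyGetD fav ((x.toNat : Nat) : Int) ([] : List String)
      = PySem.List.pyGetD fav x ([] : List String) := by
  rw [Int.toNat_of_nonneg hx0]

-- per-index agreement of the two keep-decisions
theorem pv_keep_eq (fav : List (List String)) (i : Int) (h0 : 0 ≤ i) (hn : i < fav.length) :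
    (!((PySem.List.pyRange 0 (PySem.List.len fav) 1).foldl (fun b j =>
        if i == j then b
        else if PySem.Set.issubset (PySem.Set.ofList (PySem.List.pyGetD fav i []))
              (PySem.Set.ofList (PySem.List.pyGetD fav j [])) then true
        else b) false))
    = (match PySem.List.pyGetD fav i [] with
      | [] => decide ((PySem.List.len fav : Int) ≤ 1)
      | c0 :: rest =>
        (PySem.Set.discard
          (rest.foldl (fun s c => PySem.Set.inter s ((pvPostings fav).getD c PySem.Set.empty))
            (PySem.Set.ofList ((pvPostings fav).getD c0 PySem.Set.empty))) i).isEmpty) := by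
  rw [pv_foldl_flag, Bool.false_or, Bool.eq_iff_iff]
  have hA : (!((PySem.List.pyRange 0 (PySem.List.len fav) 1).any (fun j =>
      !(i == j) && PySem.Set.issubset (PySem.Set.ofList (PySem.List.pyGetD fav i []))
        (PySem.Set.ofList (PySem.List.pyGetD fav j []))))) = true
      ↔ (∀ (k : Nat) (hk : k < fav.length),
          (∀ x ∈ PySem.List.pyGetD fav i [], x ∈ fav[k]) → (k : Int) = i) := by
    simp only [Bool.not_eq_eq_eq_not, Bool.not_true, List.any_eq_false,
      PySem.List.mem_pyRange_one, PySem.List.len_eq, Bool.and_eq_true,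
      beq_eq_false_iff_ne, PySem.Set.issubset_iff, PySem.Set.mem_ofList, not_and]
    constructor
    · intro h k hk hsub
      by_contra hne
      have hx := h (k : Int) ⟨Int.natCast_nonneg k, by exact_mod_cast hk⟩
        (fun he => hne he.symm)
      rw [pv_getD_nat fav k hk] at hx
      exact hx hsub
    · rintro h x ⟨hx0, hxn⟩ hne hsub
      have hk : x.toNat < fav.length := by omega
      have := h x.toNat hk (by rwa [← pv_getD_nat fav x.toNat hk, pv_cast_toNat fav x hx0] )
      apply hne
      omega
  rw [hA]
  cases hfi : PySem.List.pyGetD fav i [] with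
  | nil =>
    simp only [decide_eq_true_eq, PySem.List.len_eq, List.not_mem_nil,
      false_implies, implies_true, forall_const]
    constructor
    · intro hP
      by_contra hgt
      have e0 := hP 0 (by omega)
      have e1 := hP 1 (by omega)
      omega
    · intro hle k hk
      omega
  | cons c0 rest =>
    rw [List.isEmpty_iff, List.eq_nil_iff_forall_not_mem]
    simp only [PySem.Set.mem_discard, pv_interfold_mem, PySem.Set.mem_ofList, pv_postings_mem]
    constructor
    · rintro hP j ⟨⟨⟨k, hk, hc0, rfl⟩, hrest⟩, hne⟩
      apply hne
      apply hP k hk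
      intro x hx
      rcases List.mem_cons.1 hx with rfl | hx
      · exact hc0
      · obtain ⟨k', hk', hcx, hkk⟩ := hrest x hx
        have hke : k' = k := by exact_mod_cast hkk.symm
        exact hke ▸ hcx
    · intro h k hk hsub
      by_contra hne
      exact h (k : Int) ⟨⟨⟨k, hk, hsub _ List.mem_cons_self, rfl⟩,
        fun c hc => ⟨k, hk, hsub c (List.mem_cons_of_mem _ hc), rfl⟩⟩, hne⟩

-- ===== VERDICT (by name: the statement is the Claim_ definition above) =====
theorem peopleIndexes_spec : Claim_equal_peopleIndexes := by
  intro fav _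
  unfold Spec_peopleIndexes peopleIndexes peopleIndexes_alt
  dsimp only
  rw [PySem.List.enumerate_eq_map_pyRange (xs := fav) (d := []), List.foldl_map]
  apply PySem.List.foldl_congr_mem
  intro ans i hi
  rw [PySem.List.mem_pyRange_one] at hi
  simp only [PySem.List.len_eq] at hi
  rw [pv_keep_eq fav i hi.1 (by exact_mod_cast hi.2)]
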